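-- pv_equiv track=rewrite | github.com/Kiguli/AdderBoard | formal/verify_smt.py | _possible_output_digits
-- ===== SOURCE A (Python) =====
-- def _carry_in_at(carry_mask: int, pos: int) -> int:
--     if pos == 0:
--         return 0
--     return 1 if (carry_mask & (1 << (pos - 1))) else 0
--
-- def _possible_output_digits(carry_mask: int, pos: int) -> list[int]:
--     """All possible output digits at position pos for this carry partition."""
--     if pos == 10:
--         # Overflow: 0 or 1
--         return [1 if (carry_mask & (1 << 9)) else 0]
--
--     c_in = _carry_in_at(carry_mask, pos)
--     c_out = 1 if (carry_mask & (1 << pos)) else 0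
--     digits = set()
--     for a_d in range(10):
--         for b_d in range(10):
--             s = a_d + b_d + c_in
--             if (c_out and s >= 10) or (not c_out and s < 10):
--                 digits.add(s % 10)
--     return sorted(digits)
-- ===== SOURCE B (Python) =====
-- def _possible_output_digits(carry_mask: int, pos: int) -> list[int]:
--     """All possible output digits at position pos for this carry partition."""
--     if pos == 10:
--         # Overflow: 0 or 1
--         return [1 if (carry_mask & (1 << 9)) else 0]
--     c_in = 0 if pos == 0 else (1 if carry_mask & (1 << (pos - 1)) else 0)
--     c_out = 1 if carry_mask & (1 << pos) else 0
--     # The reachable sums a+b+c_in form a contiguous interval, so the output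
--     # digits s % 10 are a contiguous, already-sorted range in each carry case.
--     if c_out:
--         return list(range(0, 9 + c_in))
--     return list(range(c_in, 10))
-- ===== Notes on version B (the rewrite author's own statement) =====
-- stated objective: simpler
-- what changed: Replaces the 10x10 nested loop with set-building and final sort by a closed-form contiguous range: range(c_in, 10) when c_out is 0 and range(0, 9 + c_in) when c_out is 1.
import Mathlib
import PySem

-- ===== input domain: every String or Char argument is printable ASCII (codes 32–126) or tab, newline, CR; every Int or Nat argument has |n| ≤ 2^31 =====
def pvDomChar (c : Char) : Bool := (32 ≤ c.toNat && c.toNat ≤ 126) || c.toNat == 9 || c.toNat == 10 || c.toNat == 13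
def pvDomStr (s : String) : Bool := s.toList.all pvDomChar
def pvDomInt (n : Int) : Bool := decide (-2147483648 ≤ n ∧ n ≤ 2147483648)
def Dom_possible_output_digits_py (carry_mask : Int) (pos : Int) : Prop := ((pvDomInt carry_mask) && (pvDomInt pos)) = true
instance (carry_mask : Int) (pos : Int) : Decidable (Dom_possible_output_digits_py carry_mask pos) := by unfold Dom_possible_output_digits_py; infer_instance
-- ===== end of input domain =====

-- B replaces A's 10x10 loop + set + sort by the closed-form sorted range of reachable output digits (simpler).


-- ===== PORT A =====
def pv_carry_in_at (carry_mask : Int) (pos : Int) : Int :=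
  if pos = 0 then 0
  else if PySem.Int.band carry_mask (1 <<< (pos - 1).toNat) ≠ 0 then 1 else 0

def possible_output_digits_py (carry_mask : Int) (pos : Int) : List Int :=
  if pos = 10 then
    [if PySem.Int.band carry_mask (1 <<< (9 : Nat)) ≠ 0 then 1 else 0]
  else
    let c_in := pv_carry_in_at carry_mask pos
    let c_out : Int := if PySem.Int.band carry_mask (1 <<< pos.toNat) ≠ 0 then 1 else 0
    let digits : PySem.Set Int :=
      (PySem.List.pyRange 0 10 1).foldl (fun acc a_d =>
        (PySem.List.pyRange 0 10 1).foldl (fun acc b_d =>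
          let s := a_d + b_d + c_in
          if (c_out ≠ 0 ∧ 10 ≤ s) ∨ (c_out = 0 ∧ s < 10) then
            PySem.Set.add acc (PySem.Int.mod s 10)
          else acc) acc) PySem.Set.empty
    PySem.List.sorted digits (fun x => x) false

-- ===== PORT B =====
def possible_output_digits_py_alt (carry_mask : Int) (pos : Int) : List Int :=
  if pos = 10 then
    [if PySem.Int.band carry_mask (1 <<< (9 : Nat)) ≠ 0 then 1 else 0]
  else
    let c_in : Int := if pos = 0 then 0
      else if PySem.Int.band carry_mask (1 <<< (pos - 1).toNat) ≠ 0 then 1 else 0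
    let c_out : Int := if PySem.Int.band carry_mask (1 <<< pos.toNat) ≠ 0 then 1 else 0
    if c_out ≠ 0 then PySem.List.pyRange 0 (9 + c_in) 1
    else PySem.List.pyRange c_in 10 1

-- ===== PRECONDITION & SPEC =====
-- Pre_ excludes pos < 0, on which Python A raises ValueError ("negative shift count").
def Pre_possible_output_digits_py (_carry_mask : Int) (pos : Int) : Prop := 0 ≤ pos
instance (carry_mask : Int) (pos : Int) : Decidable (Pre_possible_output_digits_py carry_mask pos) := by unfold Pre_possible_output_digits_py; infer_instance
def pvWitness_possible_output_digits_py : Int × Int := (5, 3)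

def Spec_possible_output_digits_py (carry_mask : Int) (pos : Int) (out : List Int) : Prop := out = possible_output_digits_py_alt carry_mask pos
instance (carry_mask : Int) (pos : Int) (out : List Int) : Decidable (Spec_possible_output_digits_py carry_mask pos out) := by unfold Spec_possible_output_digits_py; infer_instance

-- ===== CLAIM (what is proved, stated in full; the proofs are below) =====
def Claim_equal_possible_output_digits_py : Prop := ∀ (carry_mask : Int) (pos : Int), Dom_possible_output_digits_py carry_mask pos → Pre_possible_output_digits_py carry_mask pos → Spec_possible_output_digits_py carry_mask pos (possible_output_digits_py carry_mask pos)

-- ===== LEMMAS AND PROOFS =====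

-- The core fact: for carries in {0,1}, A's sorted set of loop results is B's range.
set_option maxRecDepth 10000 in
lemma loop_eval (c_in c_out : Int) (h1 : c_in = 0 ∨ c_in = 1) (h2 : c_out = 0 ∨ c_out = 1) :
    PySem.List.sorted
      ((PySem.List.pyRange 0 10 1).foldl (fun acc a_d =>
        (PySem.List.pyRange 0 10 1).foldl (fun acc b_d =>
          let s := a_d + b_d + c_in
          if (c_out ≠ 0 ∧ 10 ≤ s) ∨ (c_out = 0 ∧ s < 10) then
            PySem.Set.add acc (PySem.Int.mod s 10)
          else acc) acc) PySem.Set.empty) (fun x => x) false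
    = (if c_out ≠ 0 then PySem.List.pyRange 0 (9 + c_in) 1
       else PySem.List.pyRange c_in 10 1) := by
  rcases h1 with h1 | h1 <;> rcases h2 with h2 | h2 <;> subst h1 <;> subst h2 <;> decide

-- ===== VERDICT (by name: the statement is the Claim_ definition above) =====
theorem possible_output_digits_py_spec : Claim_equal_possible_output_digits_py := by
  intro carry_mask pos _ _
  unfold Spec_possible_output_digits_py
  by_cases h10 : pos = 10
  · simp [possible_output_digits_py, possible_output_digits_py_alt, h10]
  · simp only [possible_output_digits_py, possible_output_digits_py_alt, pv_carry_in_at,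
      if_neg h10]
    exact loop_eval _ _ (by split_ifs <;> simp) (by split_ifs <;> simp)
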